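-- pv_equiv track=rewrite | github.com/aniru888/EY_Gov | scripts/04_fetch_epfo.py | sum_across_sections
-- ===== SOURCE A (Python) =====
-- def sum_across_sections(sections_data):
--     """
--     Sum payroll values across all age bucket sections for each (state, column).
--
--     Args:
--         sections_data: list of dicts from extract_section_data
--
--     Returns:
--         dict: {state_name: {col_index: total_value}}
--     """
--     total_data = {}
--
--     # Collect all unique state names across sections
--     all_states = set()
--     for section in sections_data:
--         all_states.update(section.keys())
--
--     # Sum across sections for each state
--     for state in all_states:
--         total_data[state] = {}
--
--         # Determine all columns from first section
--         if sections_data: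
--             first_section = sections_data[0]
--             if state in first_section:
--                 cols = first_section[state].keys()
--             else:
--                 # Use any state from first section to get columns
--                 sample_state = next(iter(first_section.keys()))
--                 cols = first_section[sample_state].keys()
--
--             for col_idx in cols:
--                 total = 0
--                 for section in sections_data:
--                     if state in section and col_idx in section[state]:
--                         total += section[state][col_idx]
--
--                 total_data[state][col_idx] = total
--
--     return total_data
-- ===== SOURCE B (Python) =====
-- def sum_across_sections(sections_data):
--     """Sum payroll values across sections per (state, column) in one pass."""
--     if not sections_data:
--         return {}
--     # states in first-occurrence order
--     states = []
--     seen = set()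
--     for section in sections_data:
--         for st in section:
--             if st not in seen:
--                 seen.add(st)
--                 states.append(st)
--     # one pass over all entries, accumulating by (state, column)
--     totals = {}
--     for section in sections_data:
--         for st, row in section.items():
--             for col, val in row.items():
--                 key = (st, col)
--                 totals[key] = totals.get(key, 0) + val
--     first = sections_data[0]
--     out = {}
--     for st in states:
--         row = first[st] if st in first else first[next(iter(first))]
--         out[st] = {c: totals.get((st, c), 0) for c in row}
--     return out
-- ===== Notes on version B (the rewrite author's own statement) =====
-- stated objective: faster
-- what changed: Instead of re-scanning every section for each (state, column) pair, B makes one pass over all entries accumulating a (state, column)-keyed totals dictionary and then reads the answers off it.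
import Mathlib
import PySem

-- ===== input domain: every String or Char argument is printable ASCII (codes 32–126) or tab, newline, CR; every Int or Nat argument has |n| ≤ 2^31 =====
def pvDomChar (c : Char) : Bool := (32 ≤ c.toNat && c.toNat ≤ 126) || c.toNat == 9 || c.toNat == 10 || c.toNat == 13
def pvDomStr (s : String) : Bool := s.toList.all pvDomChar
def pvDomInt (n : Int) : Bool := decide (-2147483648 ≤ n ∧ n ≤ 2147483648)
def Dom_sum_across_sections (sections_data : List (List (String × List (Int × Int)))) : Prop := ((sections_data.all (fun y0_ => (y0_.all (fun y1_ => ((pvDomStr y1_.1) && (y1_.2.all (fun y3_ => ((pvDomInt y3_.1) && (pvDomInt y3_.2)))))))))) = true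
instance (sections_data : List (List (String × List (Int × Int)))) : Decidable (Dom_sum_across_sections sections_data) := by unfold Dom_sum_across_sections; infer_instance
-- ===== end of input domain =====

-- B replaces A's per-(state,column) rescan of all sections by one accumulation pass over all entries (faster).

-- ===== PORT A =====
def sum_across_sections (sections_data : List (List (String × List (Int × Int)))) : List (String × List (Int × Int)) :=
  let all_states : PySem.Set String :=
    sections_data.foldl (fun s sec => PySem.Set.update s (sec.map Prod.fst)) PySem.Set.empty
  let total_data : PySem.Dict String (PySem.Dict Int Int) :=
    all_states.foldl (fun td state =>
      match sections_data with
      | [] => td.insert state PySem.Dict.empty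
      | first_section :: _ =>
        let cols : List Int :=
          match (PySem.Dict.mk first_section).get? state with
          | some row => row.map Prod.fst
          | none =>
            -- sample_state = next(iter(first_section)): raises StopIteration on an empty first sec (outside Pre_)
            match first_section.head? with
            | some sample => (((PySem.Dict.mk first_section).get? sample.1).getD []).map Prod.fst
            | none => []
        td.insert state (cols.foldl (fun drow col_idx =>
          drow.insert col_idx (sections_data.foldl (fun total sec =>
            match (PySem.Dict.mk sec).get? state with
            | some row =>
              match (PySem.Dict.mk row).get? col_idx with
              | some v => total + v
              | none => total
            | none => total) 0)) PySem.Dict.empty)) PySem.Dict.empty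
  total_data.items.map (fun p => (p.1, p.2.items))

-- ===== PORT B =====
def sum_across_sections_alt (sections_data : List (List (String × List (Int × Int)))) : List (String × List (Int × Int)) :=
  match sections_data with
  | [] => []
  | first :: rest =>
    let states : PySem.Set String :=
      (first :: rest).foldl (fun acc sec => (sec.map Prod.fst).foldl PySem.Set.add acc) PySem.Set.empty
    let totals : PySem.Dict (String × Int) Int :=
      (first :: rest).foldl (fun t sec =>
        sec.foldl (fun t e =>
          e.2.foldl (fun t cv =>
            t.insert (e.1, cv.1) (t.getD (e.1, cv.1) 0 + cv.2)) t) t) PySem.Dict.empty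
    let out : PySem.Dict String (PySem.Dict Int Int) :=
      states.foldl (fun out st =>
        let row : List (Int × Int) :=
          match (PySem.Dict.mk first).get? st with
          | some r => r
          | none =>
            match first.head? with
            | some sample => ((PySem.Dict.mk first).get? sample.1).getD []
            | none => []
        out.insert st ((row.map Prod.fst).foldl
          (fun d c => d.insert c (totals.getD (st, c) 0)) PySem.Dict.empty)) PySem.Dict.empty
    out.items.map (fun p => (p.1, p.2.items))

-- ===== PRECONDITION & SPEC =====
-- Pre_ excludes (i) inputs on which A raises StopIteration (nonempty data whose first sec is empty while a later
-- sec is nonempty; B raises there too), and (ii) association lists with duplicate keys in a sec or a row,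
-- which do not represent Python dicts (first-match lookup vs Python's last-wins dict construction is a representation artefact).
def Pre_sum_across_sections (sections_data : List (List (String × List (Int × Int)))) : Prop :=
  (sections_data = [] ∨ sections_data.head?.getD [] ≠ [] ∨ ∀ sec ∈ sections_data, sec = []) ∧
  (∀ sec ∈ sections_data, (sec.map Prod.fst).Nodup ∧ ∀ e ∈ sec, (e.2.map Prod.fst).Nodup)
instance (sections_data : List (List (String × List (Int × Int)))) : Decidable (Pre_sum_across_sections sections_data) := by unfold Pre_sum_across_sections; infer_instance
def pvWitness_sum_across_sections : (List (List (String × List (Int × Int)))) :=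
  [[("A", [(0, 1), (1, 2)])], [("A", [(0, 3)]), ("B", [(1, 4)])]]
def Spec_sum_across_sections (sections_data : List (List (String × List (Int × Int)))) (out : List (String × List (Int × Int))) : Prop := out = sum_across_sections_alt sections_data
instance (sections_data : List (List (String × List (Int × Int)))) (out : List (String × List (Int × Int))) : Decidable (Spec_sum_across_sections sections_data out) := by unfold Spec_sum_across_sections; infer_instance

-- ===== CLAIM (what is proved, stated in full; the proofs are below) =====
def Claim_equal_sum_across_sections : Prop := ∀ (sections_data : List (List (String × List (Int × Int)))), Dom_sum_across_sections sections_data → Pre_sum_across_sections sections_data → Spec_sum_across_sections sections_data (sum_across_sections sections_data)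

-- ===== LEMMAS AND PROOFS =====

-- A's per-sec contribution to the (st, c) total
def contribA (sec : List (String × List (Int × Int))) (st : String) (c : Int) : Int :=
  match (PySem.Dict.mk sec).get? st with
  | some row =>
    match (PySem.Dict.mk row).get? c with
    | some v => v
    | none => 0
  | none => 0

-- the multiset sum B's accumulation pass collects for key q inside one sec
def secSum (sec : List (String × List (Int × Int))) (q : String × Int) : Int :=
  (sec.flatMap (fun e => (e.2.filter (fun cv => (e.1, cv.1) == q)).map Prod.snd)).sum

-- the column list both ports read off the first sec for state st
def colsOf (first : List (String × List (Int × Int))) (st : String) : List Int :=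
  match (PySem.Dict.mk first).get? st with
  | some row => row.map Prod.fst
  | none =>
    match first.head? with
    | some sample => (((PySem.Dict.mk first).get? sample.1).getD []).map Prod.fst
    | none => []

def statesOf (sections_data : List (List (String × List (Int × Int)))) : PySem.Set String :=
  sections_data.foldl (fun s sec => PySem.Set.update s (sec.map Prod.fst)) PySem.Set.empty

lemma nodup_statesOf (sd : List (List (String × List (Int × Int)))) : (statesOf sd).Nodup := by
  unfold statesOf
  suffices h : ∀ (s : PySem.Set String), s.Nodup →
      (sd.foldl (fun s sec => PySem.Set.update s (sec.map Prod.fst)) s).Nodup by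
    exact h _ List.nodup_nil
  induction sd with
  | nil => intro s hs; simpa using hs
  | cons sec tl ih =>
    intro s hs
    exact ih _ (PySem.Set.nodup_update s (sec.map Prod.fst) hs)

lemma rowfold_getD (st' : String) (row : List (Int × Int))
    (t : PySem.Dict (String × Int) Int) (q : String × Int) :
    (row.foldl (fun t cv => t.insert (st', cv.1) (t.getD (st', cv.1) 0 + cv.2)) t).getD q 0
      = t.getD q 0 + ((row.filter (fun cv => (st', cv.1) == q)).map Prod.snd).sum := by
  induction row generalizing t with
  | nil => simp
  | cons cv tl ih =>
    simp only [List.foldl_cons, List.filter_cons]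
    rw [ih]
    by_cases h : (st', cv.1) = q
    · simp [h, PySem.Dict.getD_insert_self]
      omega
    · simp [h, PySem.Dict.getD_insert, Ne.symm h]

lemma secfold_getD (sec : List (String × List (Int × Int)))
    (t : PySem.Dict (String × Int) Int) (q : String × Int) :
    (sec.foldl (fun t e =>
        e.2.foldl (fun t cv => t.insert (e.1, cv.1) (t.getD (e.1, cv.1) 0 + cv.2)) t) t).getD q 0
      = t.getD q 0 + secSum sec q := by
  induction sec generalizing t with
  | nil => simp [secSum]
  | cons e tl ih =>
    simp only [List.foldl_cons]
    rw [ih, rowfold_getD]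
    simp [secSum, add_assoc]

lemma totals_getD (sd : List (List (String × List (Int × Int)))) (q : String × Int) :
    ((sd.foldl (fun t sec =>
        sec.foldl (fun t e =>
          e.2.foldl (fun t cv => t.insert (e.1, cv.1) (t.getD (e.1, cv.1) 0 + cv.2)) t) t)
        PySem.Dict.empty).getD q 0)
      = (sd.map (fun s => secSum s q)).sum := by
  suffices h : ∀ (t : PySem.Dict (String × Int) Int),
      ((sd.foldl (fun t sec =>
        sec.foldl (fun t e =>
          e.2.foldl (fun t cv => t.insert (e.1, cv.1) (t.getD (e.1, cv.1) 0 + cv.2)) t) t) t).getD q 0)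
      = t.getD q 0 + (sd.map (fun s => secSum s q)).sum by
    simpa [PySem.Dict.getD_eq_get?_getD] using h PySem.Dict.empty
  induction sd with
  | nil => intro t; simp
  | cons sec tl ih =>
    intro t
    simp only [List.foldl_cons, List.map_cons, List.sum_cons]
    rw [ih, secfold_getD]
    ring

lemma filter_eq_nil_of_not_mem (row : List (Int × Int)) (c : Int) (h : c ∉ row.map Prod.fst) :
    row.filter (fun cv => cv.1 == c) = [] := by
  rw [List.filter_eq_nil_iff]
  intro cv hcv
  simp only [beq_iff_eq]
  intro hc
  exact h (List.mem_map.mpr ⟨cv, hcv, hc⟩)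

lemma rowsum_eq_getD (row : List (Int × Int)) (st : String) (c : Int)
    (hnd : (row.map Prod.fst).Nodup) :
    ((row.filter (fun cv => (st, cv.1) == (st, c))).map Prod.snd).sum
      = (PySem.Dict.mk row).getD c 0 := by
  induction row with
  | nil => simp [PySem.Dict.getD_eq_get?_getD, PySem.Dict.get?]
  | cons cv tl ih =>
    simp only [List.map_cons, List.nodup_cons] at hnd
    rw [PySem.Dict.getD_eq_get?_getD, PySem.Dict.get?_mk_cons]
    by_cases h : cv.1 = c
    · have htl : tl.filter (fun p => p.1 == c) = [] :=
        filter_eq_nil_of_not_mem tl c (h ▸ hnd.1)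
      have : tl.filter (fun p => ((st, p.1) == (st, c))) = [] := by
        rw [← htl]; apply List.filter_congr; intro p _; simp
      simp [h, this]
    · have := ih hnd.2
      rw [PySem.Dict.getD_eq_get?_getD] at this
      simp only [List.filter_cons]
      simpa [h] using this

lemma secSum_eq_zero_of_not_mem (sec : List (String × List (Int × Int))) (st : String) (c : Int)
    (h : st ∉ sec.map Prod.fst) :
    secSum sec (st, c) = 0 := by
  induction sec with
  | nil => simp [secSum]
  | cons e tl ih =>
    simp only [List.map_cons, List.mem_cons, not_or] at h
    have he : e.2.filter (fun cv => ((e.1, cv.1) == (st, c))) = [] := by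
      rw [List.filter_eq_nil_iff]
      intro cv _
      simp only [beq_iff_eq, Prod.mk.injEq, not_and]
      intro h1; exact absurd h1.symm h.1
    have := ih h.2
    simp [secSum, he] at this ⊢
    exact this

lemma secSum_eq_contribA (sec : List (String × List (Int × Int))) (st : String) (c : Int)
    (hkeys : (sec.map Prod.fst).Nodup)
    (hrows : ∀ e ∈ sec, (e.2.map Prod.fst).Nodup) :
    secSum sec (st, c) = contribA sec st c := by
  induction sec with
  | nil => simp [secSum, contribA, PySem.Dict.get?]
  | cons e tl ih =>
    simp only [List.map_cons, List.nodup_cons] at hkeys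
    by_cases h : e.1 = st
    · have htl : secSum tl (st, c) = 0 :=
        secSum_eq_zero_of_not_mem tl st c (h ▸ hkeys.1)
      have hrow : ((e.2.filter (fun cv => ((e.1, cv.1) == (st, c)))).map Prod.snd).sum
          = (PySem.Dict.mk e.2).getD c 0 := by
        rw [show (fun cv : Int × Int => ((e.1, cv.1) == (st, c)))
              = (fun cv : Int × Int => ((st, cv.1) == (st, c))) by rw [h]]
        exact rowsum_eq_getD e.2 st c (hrows e (List.mem_cons_self))
      have hsec : secSum (e :: tl) (st, c)
          = ((e.2.filter (fun cv => ((e.1, cv.1) == (st, c)))).map Prod.snd).sum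
            + secSum tl (st, c) := by
        simp [secSum]
      rw [hsec, hrow, htl, add_zero]
      unfold contribA
      rw [show PySem.Dict.mk (e :: tl) = PySem.Dict.mk ((e.1, e.2) :: tl) by rfl,
          PySem.Dict.get?_mk_cons]
      simp only [h, beq_self_eq_true, if_true]
      rw [PySem.Dict.getD_eq_get?_getD]
      cases (PySem.Dict.mk e.2).get? c <;> simp
    · have he : e.2.filter (fun cv => ((e.1, cv.1) == (st, c))) = [] := by
        rw [List.filter_eq_nil_iff]
        intro cv _
        simp only [beq_iff_eq, Prod.mk.injEq, not_and]
        intro h1; exact absurd h1 h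
      have hsec : secSum (e :: tl) (st, c) = secSum tl (st, c) := by
        simp [secSum, he]
      rw [hsec, ih hkeys.2 (fun x hx => hrows x (List.mem_cons_of_mem e hx))]
      unfold contribA
      rw [show PySem.Dict.mk (e :: tl) = PySem.Dict.mk ((e.1, e.2) :: tl) by rfl,
          PySem.Dict.get?_mk_cons]
      simp [h]

lemma totalA_eq_sum (sd : List (List (String × List (Int × Int)))) (st : String) (c : Int) :
    (sd.foldl (fun total sec =>
        match (PySem.Dict.mk sec).get? st with
        | some row =>
          match (PySem.Dict.mk row).get? c with
          | some v => total + v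
          | none => total
        | none => total) 0)
      = (sd.map (fun s => contribA s st c)).sum := by
  have hstep : (fun (total : Int) (sec : List (String × List (Int × Int))) =>
      match (PySem.Dict.mk sec).get? st with
      | some row =>
        match (PySem.Dict.mk row).get? c with
        | some v => total + v
        | none => total
      | none => total)
      = fun total sec => total + contribA sec st c := by
    funext total sec
    unfold contribA
    cases (PySem.Dict.mk sec).get? st with
    | none => simp
    | some row => cases hg : (PySem.Dict.mk row).get? c <;> simp [hg]
  rw [hstep, PySem.List.foldl_add]
  simp

lemma colsOf_nodup (first : List (String × List (Int × Int))) (st : String)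
    (hrows : ∀ e ∈ first, (e.2.map Prod.fst).Nodup) :
    (colsOf first st).Nodup := by
  unfold colsOf
  cases hg : (PySem.Dict.mk first).get? st with
  | some row =>
    have : (st, row) ∈ (PySem.Dict.mk first).items :=
      PySem.Dict.mem_items_of_get?_eq_some _ hg
    exact hrows (st, row) this
  | none =>
    cases hh : first.head? with
    | none => simp
    | some sample =>
      cases hg2 : (PySem.Dict.mk first).get? sample.1 with
      | none => simp [hg2]
      | some row =>
        have : (sample.1, row) ∈ (PySem.Dict.mk first).items :=
          PySem.Dict.mem_items_of_get?_eq_some _ hg2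
        simpa [hg2] using hrows (sample.1, row) this

-- A in map form
lemma A_eq_map (sd : List (List (String × List (Int × Int))))
    (hpre : Pre_sum_across_sections sd) :
    sum_across_sections sd
      = (statesOf sd).map (fun st => (st,
          (colsOf (sd.head?.getD []) st).map (fun c =>
            (c, (sd.map (fun s => contribA s st c)).sum)))) := by
  obtain ⟨-, hnd⟩ := hpre
  unfold sum_across_sections
  cases sd with
  | nil => rfl
  | cons first rest =>
    simp only [List.head?_cons, Option.getD_some]
    have hfirstrows : ∀ e ∈ first, (e.2.map Prod.fst).Nodup :=
      (hnd first (List.mem_cons_self)).2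
    -- outer fold: distinct fresh keys append
    have hsa : (first :: rest).foldl (fun s sec => PySem.Set.update s (sec.map Prod.fst))
        PySem.Set.empty = statesOf (first :: rest) := rfl
    rw [hsa]
    rw [PySem.Dict.items_foldl_insert_fresh (statesOf (first :: rest)) (fun st => st)
        _ PySem.Dict.empty (fun a _ => PySem.Dict.contains_empty a)
        (by simpa using nodup_statesOf (first :: rest))]
    simp only [PySem.Dict.empty, List.nil_append, List.map_map]
    apply List.map_congr_left
    intro st _
    have hinner : (List.foldl (fun drow col_idx =>
        drow.insert col_idx ((first :: rest).foldl (fun total sec =>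
          match (PySem.Dict.mk sec).get? st with
          | some row =>
            match (PySem.Dict.mk row).get? col_idx with
            | some v => total + v
            | none => total
          | none => total) 0)) PySem.Dict.empty (colsOf first st)).items
        = (colsOf first st).map (fun c =>
            (c, (List.map (fun s => contribA s st c) (first :: rest)).sum)) := by
      rw [PySem.Dict.items_foldl_insert_fresh (colsOf first st) (fun c => c)
          _ PySem.Dict.empty (fun a _ => PySem.Dict.contains_empty a)
          (by simpa using colsOf_nodup first st hfirstrows)]
      simp only [PySem.Dict.empty, List.nil_append]
      apply List.map_congr_left
      intro c _
      rw [totalA_eq_sum]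
    exact Prod.ext rfl hinner

-- B in map form
lemma B_eq_map (sd : List (List (String × List (Int × Int))))
    (hpre : Pre_sum_across_sections sd) :
    sum_across_sections_alt sd
      = (statesOf sd).map (fun st => (st,
          (colsOf (sd.head?.getD []) st).map (fun c =>
            (c, (sd.map (fun s => secSum s (st, c))).sum)))) := by
  obtain ⟨-, hnd⟩ := hpre
  unfold sum_across_sections_alt
  cases sd with
  | nil => rfl
  | cons first rest =>
    simp only [List.head?_cons, Option.getD_some]
    have hfirstrows : ∀ e ∈ first, (e.2.map Prod.fst).Nodup :=
      (hnd first (List.mem_cons_self)).2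
    have hstates : (first :: rest).foldl
        (fun acc sec => (sec.map Prod.fst).foldl PySem.Set.add acc) PySem.Set.empty
        = statesOf (first :: rest) := rfl
    rw [hstates]
    rw [PySem.Dict.items_foldl_insert_fresh (statesOf (first :: rest)) (fun st => st)
        _ PySem.Dict.empty (fun a _ => PySem.Dict.contains_empty a)
        (by simpa using nodup_statesOf (first :: rest))]
    simp only [PySem.Dict.empty, List.nil_append, List.map_map]
    apply List.map_congr_left
    intro st _
    have hrow : (match (PySem.Dict.mk first).get? st with
          | some r => r
          | none =>
            match first.head? with
            | some sample => ((PySem.Dict.mk first).get? sample.1).getD []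
            | none => []).map Prod.fst = colsOf first st := by
      unfold colsOf
      cases (PySem.Dict.mk first).get? st with
      | some r => rfl
      | none =>
        cases first.head? with
        | some sample => rfl
        | none => rfl
    have hinner : (((match (PySem.Dict.mk first).get? st with
          | some r => r
          | none =>
            match first.head? with
            | some sample => ((PySem.Dict.mk first).get? sample.1).getD []
            | none => []).map Prod.fst).foldl (fun (d : PySem.Dict Int Int) (c : Int) =>
        d.insert c (((first :: rest).foldl (fun (t : PySem.Dict (String × Int) Int) (sec : List (String × List (Int × Int))) =>
          sec.foldl (fun t (e : String × List (Int × Int)) =>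
            e.2.foldl (fun t (cv : Int × Int) =>
              t.insert (e.1, cv.1) (t.getD (e.1, cv.1) 0 + cv.2)) t) t)
          PySem.Dict.empty).getD (st, c) 0)) PySem.Dict.empty).items
        = (colsOf first st).map (fun c =>
            (c, (List.map (fun s => secSum s (st, c)) (first :: rest)).sum)) := by
      rw [hrow]
      rw [PySem.Dict.items_foldl_insert_fresh (colsOf first st) (fun c => c)
          _ PySem.Dict.empty (fun a _ => PySem.Dict.contains_empty a)
          (by simpa using colsOf_nodup first st hfirstrows)]
      simp only [PySem.Dict.empty, List.nil_append]
      apply List.map_congr_left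
      intro c _
      rw [show ({ items := [] } : PySem.Dict (String × Int) Int) = PySem.Dict.empty from rfl,
          totals_getD]
    exact Prod.ext rfl hinner

-- ===== VERDICT (by name: the statement is the Claim_ definition above) =====
theorem sum_across_sections_spec : Claim_equal_sum_across_sections := by
  intro sd _ hpre
  unfold Spec_sum_across_sections
  rw [A_eq_map sd hpre, B_eq_map sd hpre]
  apply List.map_congr_left
  intro st _
  congr 1
  apply List.map_congr_left
  intro c _
  congr 1
  congr 1
  apply List.map_congr_left
  intro sec hsec
  exact (secSum_eq_contribA sec st c (hpre.2 sec hsec).1 (hpre.2 sec hsec).2).symm
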